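-- pv_equiv track=rewrite | github.com/ValentinDobrynin/Meet-Commit | app/core/tags_dedup.py | validate_tag_format
-- ===== SOURCE A (Python) =====
-- FAMILIES = ("People/", "Business/", "Projects/", "Finance/", "Topic/")
--
-- def validate_tag_format(tag: str) -> bool:
--     """
--     Валидирует формат тега.
--
--     Args:
--         tag: Тег для проверки
--
--     Returns:
--         True если тег имеет правильный формат
--     """
--     if not isinstance(tag, str) or not tag.strip():
--         return False
--
--     # Проверяем формат Category/Subcategory
--     parts = tag.split("/")
--     if len(parts) != 2:
--         return False
--
--     category, subcategory = parts
--     if not category.strip() or not subcategory.strip():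
--         return False
--
--     # Проверяем, что категория из известных семейств
--     known_categories = {family.rstrip("/") for family in FAMILIES}
--     return category in known_categories
-- ===== SOURCE B (Python) =====
-- FAMILIES = ("People/", "Business/", "Projects/", "Finance/", "Topic/")
--
-- def validate_tag_format(tag: str) -> bool:
--     if not isinstance(tag, str):
--         return False
--     for family in FAMILIES:
--         if tag.startswith(family):
--             sub = tag[len(family):]
--             return bool(sub.strip()) and "/" not in sub
--     return False
-- ===== Notes on version B (the rewrite author's own statement) =====
-- stated objective: idiomatic
-- what changed: Replaces A's split-into-two-parts-then-set-membership check by a single prefix scan over FAMILIES: the first family that prefixes the tag determines the answer from the remaining suffix (non-blank and free of further separators), with no split, no set construction and no rstrip.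
import Mathlib
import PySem

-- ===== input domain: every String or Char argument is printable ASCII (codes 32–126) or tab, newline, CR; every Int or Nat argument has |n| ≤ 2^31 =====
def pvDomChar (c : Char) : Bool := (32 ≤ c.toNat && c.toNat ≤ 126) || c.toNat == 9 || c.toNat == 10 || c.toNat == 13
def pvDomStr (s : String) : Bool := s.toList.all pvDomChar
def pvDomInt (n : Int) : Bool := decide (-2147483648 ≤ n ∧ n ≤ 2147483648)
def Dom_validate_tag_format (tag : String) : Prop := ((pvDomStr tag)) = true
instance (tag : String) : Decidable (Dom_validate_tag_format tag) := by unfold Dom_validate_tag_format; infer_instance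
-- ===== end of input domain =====

-- B replaces A's split-and-set-membership test by an idiomatic prefix scan over FAMILIES; equal return value, no speed claim.

def FAMILIES : List String := ["People/", "Business/", "Projects/", "Finance/", "Topic/"]

-- ===== PORT A =====
-- family.rstrip("/") has no PySem primitive; ported by hand (exact: drop '/'-characters from the right)
def rstripSlash (f : List Char) : List Char :=
  (List.dropWhile (fun c => ("/".toList).contains c) f.reverse).reverse

def validate_core (t : List Char) : Bool :=
  -- `not tag.strip()` (the isinstance guard is vacuous on String inputs)
  if PySem.Chars.strip t = [] then false
  else
    -- parts = tag.split("/"); len(parts) != 2 → False, else unpack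
    match PySem.Chars.splitOn t "/".toList with
    | [category, subcategory] =>
      if PySem.Chars.strip category = [] || PySem.Chars.strip subcategory = [] then false
      else
        (PySem.Set.ofList (FAMILIES.map (fun f => rstripSlash f.toList))).contains category
    | _ => false

def validate_tag_format (tag : String) : Bool := validate_core tag.toList

-- ===== PORT B =====
def altGo : List String → List Char → Bool
  | [], _ => false
  | f :: rest, t =>
    if PySem.Chars.startswith t f.toList then
      let sub := PySem.List.slice t (some (PySem.Str.len f)) none
      !(PySem.Chars.strip sub).isEmpty && !(PySem.Chars.isIn "/".toList sub)
    else altGo rest t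

def validate_tag_format_alt (tag : String) : Bool := altGo FAMILIES tag.toList

-- ===== PRECONDITION & SPEC =====
def Spec_validate_tag_format (tag : String) (out : Bool) : Prop := out = validate_tag_format_alt tag
instance (tag : String) (out : Bool) : Decidable (Spec_validate_tag_format tag out) := by unfold Spec_validate_tag_format; infer_instance

-- ===== CLAIM (what is proved, stated in full; the proofs are below) =====
def Claim_equal_validate_tag_format : Prop := ∀ (tag : String), Dom_validate_tag_format tag → Spec_validate_tag_format tag (validate_tag_format tag)

-- ===== LEMMAS AND PROOFS =====

-- reference form of tag.split("/") for the single-character separator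
def refSplit : List Char → List (List Char)
  | [] => [[]]
  | c :: rest =>
    if c = '/' then [] :: refSplit rest
    else match refSplit rest with
      | [] => [[c]]
      | p :: ps => (c :: p) :: ps

theorem refSplit_ne_nil (t : List Char) : refSplit t ≠ [] := by
  cases t with
  | nil => simp [refSplit]
  | cons c rest =>
    simp only [refSplit]
    split
    · simp
    · split <;> simp

theorem go_spec : ∀ (fuel : Nat) (t cur : List Char) (acc : List (List Char)),
    t.length < fuel →
    PySem.Chars.splitOn.go ['/'] fuel t cur acc =
      acc.reverse ++ (match refSplit t with
        | [] => []
        | p :: ps => (cur.reverse ++ p) :: ps) := by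
  intro fuel
  induction fuel with
  | zero => intro t cur acc h; omega
  | succ n ih =>
    intro t cur acc h
    cases t with
    | nil => simp [PySem.Chars.splitOn.go, refSplit]
    | cons c rest =>
      by_cases hc : c = '/'
      · subst hc
        have hp : List.isPrefixOf ['/'] ('/' :: rest) = true := by simp [List.isPrefixOf]
        rw [PySem.Chars.splitOn.go]
        simp only [hp, if_pos]
        rw [ih _ _ _ (by simpa using Nat.lt_of_succ_lt_succ h)]
        simp [refSplit]
        cases hr : refSplit rest with
        | nil => exact absurd hr (refSplit_ne_nil rest)
        | cons p ps => simp
      · have hp : List.isPrefixOf ['/'] (c :: rest) = false := by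
          simp [List.isPrefixOf]; exact fun h' => absurd h'.symm hc
        rw [PySem.Chars.splitOn.go]
        simp only [hp, Bool.false_eq_true, if_false]
        rw [ih _ _ _ (by simpa using Nat.lt_of_succ_lt_succ h)]
        simp only [refSplit, hc]
        cases hr : refSplit rest with
        | nil => exact absurd hr (refSplit_ne_nil rest)
        | cons p ps => simp

theorem splitOn_eq_refSplit (t : List Char) : PySem.Chars.splitOn t ['/'] = refSplit t := by
  rw [PySem.Chars.splitOn, go_spec _ _ _ _ (Nat.lt_succ_self _)]
  cases hr : refSplit t with
  | nil => exact absurd hr (refSplit_ne_nil t)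
  | cons p ps => simp

theorem refSplit_append (c s : List Char) (hc : '/' ∉ c) :
    refSplit (c ++ '/' :: s) = c :: refSplit s := by
  induction c with
  | nil => simp [refSplit]
  | cons x xs ih =>
    have hx : x ≠ '/' := fun h => hc (h ▸ List.mem_cons_self)
    have ih' := ih (fun h => hc (List.mem_cons_of_mem _ h))
    simp only [List.cons_append, refSplit, hx, if_false, ih']

theorem refSplit_singleton (s a : List Char) :
    refSplit s = [a] ↔ a = s ∧ '/' ∉ s := by
  induction s generalizing a with
  | nil =>
    constructor
    · intro h
      injection h with h1 _
      exact ⟨h1.symm, by simp⟩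
    · rintro ⟨rfl, _⟩
      rfl
  | cons x xs ih =>
    by_cases hx : x = '/'
    · subst hx
      simp only [refSplit, if_pos]
      constructor
      · intro h
        injection h with _ h2
        exact (refSplit_ne_nil xs h2).elim
      · rintro ⟨rfl, hmem⟩
        exact absurd List.mem_cons_self hmem
    · cases hr : refSplit xs with
      | nil => exact absurd hr (refSplit_ne_nil xs)
      | cons p ps =>
        simp only [refSplit, hx, if_false, hr]
        constructor
        · intro h
          injection h with h1 h2
          subst h2
          have hp := (ih p).mp hr
          refine ⟨by rw [← h1, hp.1], ?_⟩
          intro hm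
          rcases List.mem_cons.mp hm with h' | h'
          · exact hx h'.symm
          · exact hp.2 h'
        · rintro ⟨rfl, hmem⟩
          have h2 : '/' ∉ xs := fun hm => hmem (List.mem_cons_of_mem _ hm)
          have hxx := (ih xs).mpr ⟨rfl, h2⟩
          rw [hr] at hxx
          injection hxx with e1 e2
          rw [e1, e2]

theorem refSplit_pair (t a b : List Char) (h : refSplit t = [a, b]) :
    t = a ++ '/' :: b := by
  induction t generalizing a with
  | nil => simp [refSplit] at h
  | cons x xs ih =>
    by_cases hx : x = '/'
    · subst hx
      simp only [refSplit, if_pos] at h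
      injection h with h1 h2
      have hb := (refSplit_singleton xs b).mp h2
      rw [← h1, hb.1]
      rfl
    · cases hr : refSplit xs with
      | nil => exact absurd hr (refSplit_ne_nil xs)
      | cons p ps =>
        simp only [refSplit, hx, if_false, hr] at h
        injection h with h1 h2
        have hxs := ih p (by rw [hr, h2])
        rw [← h1, hxs]
        rfl

theorem strip_cons_ne_nil (c : Char) (l : List Char) (h : PySem.Chars.isspace c = false) :
    PySem.Chars.strip (c :: l) ≠ [] := by
  intro hnil
  have h1 : PySem.Chars.lstrip (c :: l) = c :: l := by
    simp [PySem.Chars.lstrip, h]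
  rw [PySem.Chars.strip, h1, PySem.Chars.rstrip, List.reverse_eq_nil_iff,
    List.dropWhile_eq_nil_iff] at hnil
  have := hnil c (by simp)
  simp [h] at this

theorem isIn_slash (s : List Char) : PySem.Chars.isIn "/".toList s = true ↔ '/' ∈ s := by
  have hs : "/".toList = ['/'] := rfl
  rw [hs, PySem.Chars.isIn_iff_infix]
  constructor
  · intro h
    exact List.singleton_sublist.mp h.sublist
  · intro h
    obtain ⟨l1, l2, rfl⟩ := List.mem_iff_append.mp h
    exact ⟨l1, l2, by simp⟩

-- A on an input that begins with a known family "c ++ '/'"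
theorem core_prefix (c : List Char) (ch : Char) (cs : List Char) (hce : c = ch :: cs)
    (hsp : PySem.Chars.isspace ch = false) (hc : '/' ∉ c)
    (hmem : (PySem.Set.ofList (FAMILIES.map (fun f => rstripSlash f.toList))).contains c = true)
    (s : List Char) :
    validate_core (c ++ '/' :: s) =
      (!(PySem.Chars.strip s).isEmpty && !(PySem.Chars.isIn "/".toList s)) := by
  have hstrip : PySem.Chars.strip (c ++ '/' :: s) ≠ [] := by
    rw [hce]; exact strip_cons_ne_nil ch _ hsp
  have hsplit : PySem.Chars.splitOn (c ++ '/' :: s) "/".toList = c :: refSplit s := by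
    have hone : "/".toList = ['/'] := rfl
    rw [hone, splitOn_eq_refSplit, refSplit_append _ _ hc]
  rw [validate_core, if_neg hstrip, hsplit]
  cases hr : refSplit s with
  | nil => exact absurd hr (refSplit_ne_nil s)
  | cons p ps =>
    cases ps with
    | nil =>
      have hp := (refSplit_singleton s p).mp hr
      have hp1 : p = s := hp.1
      have hmem' : '/' ∉ s := hp.2
      rw [hp1]
      have hcstrip : PySem.Chars.strip c ≠ [] := by
        rw [hce]; exact strip_cons_ne_nil ch _ hsp
      have hnotin : PySem.Chars.isIn "/".toList s = false := by
        cases hIn : PySem.Chars.isIn "/".toList s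
        · rfl
        · exact absurd ((isIn_slash s).mp hIn) hmem'
      simp only [hnotin, Bool.not_false, Bool.and_true]
      by_cases hs2 : PySem.Chars.strip s = []
      · simp [hcstrip, hs2]
      · have hEmp : (PySem.Chars.strip s).isEmpty = false := by
          simpa [List.isEmpty_iff] using hs2
        simp [hcstrip, hs2, hEmp]
        simpa using hmem
    | cons q qs =>
      have hin : '/' ∈ s := by
        by_contra hnot
        have h1 := (refSplit_singleton s s).mpr ⟨rfl, hnot⟩
        rw [hr] at h1
        injection h1 with _ h2
        exact List.cons_ne_nil _ _ h2
      have hIn : PySem.Chars.isIn ['/'] s = true := (isIn_slash s).mpr hin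
      simp [hIn]

theorem no_family_contra (t a b : List Char) (fam : String) (ht : t = a ++ '/' :: b)
    (hfa : a ++ ['/'] = fam.toList)
    (hpf : PySem.Chars.startswith t fam.toList = false) : False := by
  have htrue : PySem.Chars.startswith t fam.toList = true := by
    rw [PySem.Chars.startswith_iff, ht, ← hfa]
    exact ⟨b, by simp⟩
  rw [htrue] at hpf
  cases hpf

theorem core_no_family (t : List Char)
    (h : ∀ f ∈ FAMILIES, PySem.Chars.startswith t f.toList = false) :
    validate_core t = false := by
  rw [validate_core]
  by_cases hstrip : PySem.Chars.strip t = []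
  · simp [hstrip]
  · rw [if_neg hstrip]
    have hone : "/".toList = ['/'] := rfl
    rw [hone, splitOn_eq_refSplit]
    cases hr : refSplit t with
    | nil => exact absurd hr (refSplit_ne_nil t)
    | cons a ps =>
      cases ps with
      | nil => rfl
      | cons b qs =>
        cases qs with
        | cons _ _ => rfl
        | nil =>
          have ht : t = a ++ '/' :: b := refSplit_pair t a b hr
          by_cases hsa : PySem.Chars.strip a = []
          · simp [hsa]
          · by_cases hsb : PySem.Chars.strip b = []
            · simp [hsb]
            · simp only [hsa, hsb, decide_false, Bool.or_self, Bool.false_eq_true, if_false]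
              -- membership of a in the known-category set would make some family a prefix of t
              by_contra hcontains
              rw [Bool.not_eq_false] at hcontains
              have hmem : a ∈ FAMILIES.map (fun f => rstripSlash f.toList) := by
                rw [PySem.Set.contains, List.contains_iff_mem, PySem.Set.mem_ofList] at hcontains
                exact hcontains
              simp only [FAMILIES, List.map, List.mem_cons, List.not_mem_nil, or_false] at hmem
              rcases hmem with h1 | h1 | h1 | h1 | h1
              · exact no_family_contra t a b "People/" ht (by rw [h1]; rfl)
                  (h "People/" (by simp [FAMILIES]))
              · exact no_family_contra t a b "Business/" ht (by rw [h1]; rfl)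
                  (h "Business/" (by simp [FAMILIES]))
              · exact no_family_contra t a b "Projects/" ht (by rw [h1]; rfl)
                  (h "Projects/" (by simp [FAMILIES]))
              · exact no_family_contra t a b "Finance/" ht (by rw [h1]; rfl)
                  (h "Finance/" (by simp [FAMILIES]))
              · exact no_family_contra t a b "Topic/" ht (by rw [h1]; rfl)
                  (h "Topic/" (by simp [FAMILIES]))

-- one family step of B
theorem family_step (fam : String) (t : List Char)
    (hpre : PySem.Chars.startswith t fam.toList = true)
    (c : List Char) (ch : Char) (cs : List Char) (hce : c = ch :: cs)
    (hfc : fam.toList = c ++ ['/'])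
    (hsp : PySem.Chars.isspace ch = false) (hc : '/' ∉ c)
    (hmem : (PySem.Set.ofList (FAMILIES.map (fun f => rstripSlash f.toList))).contains c = true)
    (hlen : PySem.Str.len fam = (fam.toList.length : Int)) :
    validate_core t =
      (!(PySem.Chars.strip (PySem.List.slice t (some (PySem.Str.len fam)) none)).isEmpty
        && !(PySem.Chars.isIn "/".toList (PySem.List.slice t (some (PySem.Str.len fam)) none))) := by
  obtain ⟨s, hs⟩ := (PySem.Chars.startswith_iff t fam.toList).mp hpre
  have hslice : PySem.List.slice t (some (PySem.Str.len fam)) none = s := by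
    rw [hlen, PySem.List.slice_from _ (Int.natCast_nonneg _)]
    rw [← hs, Int.toNat_natCast, List.drop_left]
  rw [hslice, ← hs, hfc]
  have : c ++ ['/'] ++ s = c ++ '/' :: s := by simp
  rw [this]
  exact core_prefix c ch cs hce hsp hc hmem s

-- ===== VERDICT (by name: the statement is the Claim_ definition above) =====
theorem validate_tag_format_spec : Claim_equal_validate_tag_format := by
  intro tag _
  unfold Spec_validate_tag_format validate_tag_format validate_tag_format_alt
  set t := tag.toList with ht
  simp only [FAMILIES, altGo]
  by_cases h1 : PySem.Chars.startswith t "People/".toList = true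
  · rw [if_pos h1]
    exact family_step "People/" t h1 "People".toList 'P' "eople".toList rfl rfl (by decide) (by decide) (by decide) rfl
  · rw [if_neg h1]
    by_cases h2 : PySem.Chars.startswith t "Business/".toList = true
    · rw [if_pos h2]
      exact family_step "Business/" t h2 "Business".toList 'B' "usiness".toList rfl rfl (by decide) (by decide) (by decide) rfl
    · rw [if_neg h2]
      by_cases h3 : PySem.Chars.startswith t "Projects/".toList = true
      · rw [if_pos h3]
        exact family_step "Projects/" t h3 "Projects".toList 'P' "rojects".toList rfl rfl (by decide) (by decide) (by decide) rfl
      · rw [if_neg h3]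
        by_cases h4 : PySem.Chars.startswith t "Finance/".toList = true
        · rw [if_pos h4]
          exact family_step "Finance/" t h4 "Finance".toList 'F' "inance".toList rfl rfl (by decide) (by decide) (by decide) rfl
        · rw [if_neg h4]
          by_cases h5 : PySem.Chars.startswith t "Topic/".toList = true
          · rw [if_pos h5]
            exact family_step "Topic/" t h5 "Topic".toList 'T' "opic".toList rfl rfl (by decide) (by decide) (by decide) rfl
          · rw [if_neg h5]
            refine core_no_family t ?_
            intro f hf
            simp only [FAMILIES, List.mem_cons, List.not_mem_nil, or_false] at hf
            rcases hf with rfl | rfl | rfl | rfl | rfl <;>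
              simp_all
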